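-- pv_equiv track=rewrite | github.com/vakovalskii/phantom-agent | pac1_agent/knowledge_capture.py | resolve_capture_bucket
-- ===== SOURCE A (Python) =====
-- def resolve_capture_bucket(
--     bucket_names: list[str],
--     preferred_bucket: str | None,
-- ) -> str | None:
--     names = [name for name in bucket_names if name]
--     if not names:
--         return None
--     if preferred_bucket:
--         target = preferred_bucket.strip().lower()
--         for name in names:
--             if name.lower() == target:
--                 return name
--         for name in names:
--             if name.lower().startswith(target[:6]) or target.startswith(name.lower()[:6]):
--                 return name
--     return names[0]
-- ===== SOURCE B (Python) =====
-- def resolve_capture_bucket(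
--     bucket_names: list[str],
--     preferred_bucket: str | None,
-- ) -> str | None:
--     if preferred_bucket:
--         target = preferred_bucket.strip().lower()
--         t6 = target[:6]
--         first_prefix = None
--         first_kept = None
--         for name in bucket_names:
--             if not name:
--                 continue
--             low = name.lower()
--             if low == target:
--                 return name
--             if first_kept is None:
--                 first_kept = name
--             if first_prefix is None and (low.startswith(t6) or target.startswith(low[:6])):
--                 first_prefix = name
--         return first_prefix if first_prefix is not None else first_kept
--     for name in bucket_names:
--         if name:
--             return name
--     return None
-- ===== Notes on version B (the rewrite author's own statement) =====
-- stated objective: alternative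
-- what changed: Replaces A's filter-then-two-scans (one for exact match, one for prefix match, plus names[0] fallback) with a single pass over bucket_names that returns immediately on an exact match and otherwise tracks the first prefix match and the first non-empty name.
import Mathlib
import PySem

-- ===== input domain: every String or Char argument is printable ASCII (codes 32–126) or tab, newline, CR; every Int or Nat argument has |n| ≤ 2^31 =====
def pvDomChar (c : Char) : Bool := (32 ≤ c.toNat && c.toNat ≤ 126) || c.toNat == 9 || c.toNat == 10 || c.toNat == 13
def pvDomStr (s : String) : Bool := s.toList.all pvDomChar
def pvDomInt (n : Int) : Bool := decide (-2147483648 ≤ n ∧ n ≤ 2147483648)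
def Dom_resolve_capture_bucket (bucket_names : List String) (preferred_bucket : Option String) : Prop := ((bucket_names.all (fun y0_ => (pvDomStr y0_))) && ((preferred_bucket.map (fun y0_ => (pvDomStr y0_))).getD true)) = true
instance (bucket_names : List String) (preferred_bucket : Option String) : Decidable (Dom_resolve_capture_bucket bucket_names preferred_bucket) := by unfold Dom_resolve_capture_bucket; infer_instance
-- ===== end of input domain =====

-- B fuses A's two scans over the filtered list into ONE pass over bucket_names that
-- tracks the first prefix match and first kept name (objective: alternative/simpler decomposition).

-- ===== PORT A =====
def resolve_capture_bucket (bucket_names : List String) (preferred_bucket : Option String) : Option String :=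
  let names := bucket_names.filter (fun n => n != "")
  if names = [] then none
  else
    match preferred_bucket with
    | some p =>
      if p != "" then
        let target := PySem.Str.lower (PySem.Str.strip p)
        match names.find? (fun n => PySem.Str.lower n == target) with
        | some n => some n
        | none =>
          match names.find? (fun n =>
              PySem.Str.startswith (PySem.Str.lower n) (PySem.Str.slice target none (some 6)) ||
              PySem.Str.startswith target (PySem.Str.slice (PySem.Str.lower n) none (some 6))) with
          | some n => some n
          | none => PySem.List.pyGet? names 0
      else PySem.List.pyGet? names 0
    | none => PySem.List.pyGet? names 0

-- ===== PORT B =====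
-- single pass: return on exact match; otherwise remember first prefix match and first kept name
def altGo (target t6 : String) : List String → Option String → Option String → Option String
  | [], fp, fk => fp.or fk
  | n :: rest, fp, fk =>
    if n == "" then altGo target t6 rest fp fk
    else
      let low := PySem.Str.lower n
      if low == target then some n
      else
        let fk' := if fk.isNone then some n else fk
        let fp' := if fp.isNone && (PySem.Str.startswith low t6 ||
                     PySem.Str.startswith target (PySem.Str.slice low none (some 6)))
                   then some n else fp
        altGo target t6 rest fp' fk'

def resolve_capture_bucket_alt (bucket_names : List String) (preferred_bucket : Option String) : Option String :=
  match preferred_bucket with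
  | some p =>
    if p != "" then
      let target := PySem.Str.lower (PySem.Str.strip p)
      let t6 := PySem.Str.slice target none (some 6)
      altGo target t6 bucket_names none none
    else bucket_names.find? (fun n => n != "")
  | none => bucket_names.find? (fun n => n != "")

-- ===== PRECONDITION & SPEC =====
def Spec_resolve_capture_bucket (bucket_names : List String) (preferred_bucket : Option String) (out : Option String) : Prop := out = resolve_capture_bucket_alt bucket_names preferred_bucket
instance (bucket_names : List String) (preferred_bucket : Option String) (out : Option String) : Decidable (Spec_resolve_capture_bucket bucket_names preferred_bucket out) := by unfold Spec_resolve_capture_bucket; infer_instance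

-- ===== CLAIM (what is proved, stated in full; the proofs are below) =====
def Claim_equal_resolve_capture_bucket : Prop := ∀ (bucket_names : List String) (preferred_bucket : Option String), Dom_resolve_capture_bucket bucket_names preferred_bucket → Spec_resolve_capture_bucket bucket_names preferred_bucket (resolve_capture_bucket bucket_names preferred_bucket)

-- ===== LEMMAS AND PROOFS =====

theorem find?_ne_empty_eq_head?_filter (l : List String) :
    l.find? (fun n => n != "") = (l.filter (fun n => n != "")).head? := by
  induction l with
  | nil => rfl
  | cons x xs ih =>
    rw [List.find?_cons, List.filter_cons]
    cases hb : (x != "") with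
    | true => simp
    | false => exact ih

theorem pyGet?_zero_eq_head? (l : List String) :
    PySem.List.pyGet? l 0 = l.head? := by
  cases l <;> simp [PySem.List.pyGet?, PySem.List.pyIdx?]

theorem altGo_characterization (target t6 : String) (l : List String)
    (fp fk : Option String) :
    altGo target t6 l fp fk =
      (match (l.filter (fun n => n != "")).find? (fun n => PySem.Str.lower n == target) with
       | some n => some n
       | none =>
         (fp.or ((l.filter (fun n => n != "")).find? (fun n =>
            PySem.Str.startswith (PySem.Str.lower n) t6 ||
            PySem.Str.startswith target (PySem.Str.slice (PySem.Str.lower n) none (some 6))))).or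
         (fk.or ((l.filter (fun n => n != "")).head?))) := by
  induction l generalizing fp fk with
  | nil => cases fp <;> cases fk <;> simp [altGo]
  | cons x xs ih =>
    rw [List.filter_cons]
    cases hb : (x == "") with
    | true =>
      have hb' : (x != "") = false := by simp [bne, hb]
      rw [hb']
      simp only [altGo, hb, if_true, ih, Bool.false_eq_true, if_false]
    | false =>
      have hb' : (x != "") = true := by simp [bne, hb]
      rw [hb']
      simp only [if_true]
      cases hex : (PySem.Str.lower x == target) with
      | true =>
        simp only [altGo, hb, Bool.false_eq_true, if_false, hex, if_true,
          List.find?_cons]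
      | false =>
        simp only [altGo, hb, Bool.false_eq_true, if_false, hex, ih,
          List.find?_cons]
        cases hfind : (xs.filter (fun n => n != "")).find? (fun n => PySem.Str.lower n == target) with
        | some n => simp
        | none =>
          cases hpm : (PySem.Str.startswith (PySem.Str.lower x) t6 ||
              PySem.Str.startswith target (PySem.Str.slice (PySem.Str.lower x) none (some 6))) <;>
            cases fp <;> cases fk <;> simp [Option.or]

-- ===== VERDICT (by name: the statement is the Claim_ definition above) =====
theorem resolve_capture_bucket_spec : Claim_equal_resolve_capture_bucket := by
  intro bucket_names preferred_bucket _
  unfold Spec_resolve_capture_bucket resolve_capture_bucket resolve_capture_bucket_alt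
  cases preferred_bucket with
  | none =>
    simp only [find?_ne_empty_eq_head?_filter, pyGet?_zero_eq_head?]
    cases h : bucket_names.filter (fun n => n != "") <;> simp
  | some p =>
    cases hp : (p != "") with
    | false =>
      simp only [hp, Bool.false_eq_true, if_false,
        find?_ne_empty_eq_head?_filter, pyGet?_zero_eq_head?]
      cases h : bucket_names.filter (fun n => n != "") <;> simp
    | true =>
      simp only [hp, if_true, altGo_characterization, pyGet?_zero_eq_head?]
      cases h : bucket_names.filter (fun n => n != "") with
      | nil => simp
      | cons y ys =>
        rw [if_neg (by simp : ¬ (y :: ys = []))]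
        cases hfind : (y :: ys).find? (fun n => PySem.Str.lower n == PySem.Str.lower (PySem.Str.strip p)) with
        | some n => simp
        | none =>
          cases hpm : (y :: ys).find? (fun n =>
              PySem.Str.startswith (PySem.Str.lower n) (PySem.Str.slice (PySem.Str.lower (PySem.Str.strip p)) none (some 6)) ||
              PySem.Str.startswith (PySem.Str.lower (PySem.Str.strip p)) (PySem.Str.slice (PySem.Str.lower n) none (some 6))) with
          | some n => simp [Option.or]
          | none => simp [Option.or]
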